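-- pv_equiv track=rewrite | github.com/Yan-Yu-Lin/ocr-compare | apple-ocr-opencv/run_ocr.py | _consolidate_lines
-- ===== SOURCE A (Python) =====
-- def _consolidate_lines(lines, key, tol):
--     """Merge lines whose primary coordinate differs by less than tol."""
--     if not lines:
--         return []
--     sorted_lines = sorted(lines, key=lambda l: l[key])
--     groups = [[sorted_lines[0]]]
--     for line in sorted_lines[1:]:
--         if abs(line[key] - groups[-1][-1][key]) < tol:
--             groups[-1].append(line)
--         else:
--             groups.append([line])
--     result = []
--     for g in groups:
--         avg_primary = sum(l[key] for l in g) // len(g)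
--         min_start = min(l[1] for l in g)
--         max_end = max(l[2] for l in g)
--         result.append((avg_primary, min_start, max_end))
--     return result
-- ===== SOURCE B (Python) =====
-- def _consolidate_lines(lines, key, tol):
--     """Merge lines whose primary coordinate differs by less than tol.
--
--     Single pass over the sorted lines with running accumulators
--     (sum, count, min-start, max-end, last key) instead of building
--     intermediate group lists and aggregating in a second pass.
--     """
--     if not lines:
--         return []
--     sorted_lines = sorted(lines, key=lambda l: l[key])
--     first = sorted_lines[0]
--     s, c = first[key], 1
--     mn, mx = first[1], first[2]
--     last = first[key]
--     out = []
--     for line in sorted_lines[1:]: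
--         k = line[key]
--         if abs(k - last) < tol:
--             s += k
--             c += 1
--             mn = min(mn, line[1])
--             mx = max(mx, line[2])
--         else:
--             out.append((s // c, mn, mx))
--             s, c, mn, mx = k, 1, line[1], line[2]
--         last = k
--     out.append((s // c, mn, mx))
--     return out
-- ===== Notes on version B (the rewrite author's own statement) =====
-- stated objective: alternative
-- what changed: B replaces A's two-pass scheme (build a list of group lists, then aggregate each group) with a single pass over the sorted lines that maintains running accumulators (key-sum, count, min start, max end, last key) and emits each group's (sum//count, min, max) tuple as soon as the group closes, never materialising the groups.
import Mathlib
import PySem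

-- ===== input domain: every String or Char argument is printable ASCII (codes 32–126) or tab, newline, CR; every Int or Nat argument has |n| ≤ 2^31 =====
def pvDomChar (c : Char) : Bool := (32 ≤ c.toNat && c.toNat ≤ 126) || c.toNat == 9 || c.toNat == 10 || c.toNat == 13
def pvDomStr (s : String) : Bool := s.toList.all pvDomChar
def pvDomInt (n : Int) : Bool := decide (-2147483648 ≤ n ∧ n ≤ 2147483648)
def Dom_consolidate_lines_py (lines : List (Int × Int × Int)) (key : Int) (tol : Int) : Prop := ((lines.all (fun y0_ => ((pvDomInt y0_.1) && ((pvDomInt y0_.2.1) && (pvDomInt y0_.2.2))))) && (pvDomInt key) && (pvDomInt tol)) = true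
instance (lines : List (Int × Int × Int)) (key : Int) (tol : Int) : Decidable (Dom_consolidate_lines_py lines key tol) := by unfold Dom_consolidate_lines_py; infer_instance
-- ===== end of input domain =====

-- B replaces A's two-pass build-groups-then-aggregate with one pass over the sorted
-- lines keeping running accumulators (sum, count, min-start, max-end, last key);
-- same return value on Pre_ (alternative decomposition, no asymptotic change).

-- l[key] for a Python 3-tuple; exact for -3 ≤ key < 3 (guaranteed by Pre_), arbitrary outside
def tupGet (l : Int × Int × Int) (k : Int) : Int :=
  if k = 0 ∨ k = -3 then l.1 else if k = 1 ∨ k = -2 then l.2.1 else l.2.2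

-- ===== PORT A =====
def consolidate_lines_py (lines : List (Int × Int × Int)) (key : Int) (tol : Int) : List (Int × Int × Int) :=
  if lines = [] then []
  else
    let sorted_lines := PySem.List.sorted lines (fun l => tupGet l key) false
    match sorted_lines with
    | [] => []
    | first :: rest =>
      let groups := rest.foldl
        (fun (gs : List (List (Int × Int × Int))) line =>
          if |tupGet line key - tupGet ((gs.getLast?.getD []).getLast?.getD (0, 0, 0)) key| < tol
          then gs.dropLast ++ [(gs.getLast?.getD []) ++ [line]]
          else gs ++ [[line]])
        [[first]]
      groups.map (fun g =>
        (PySem.Int.floordiv ((g.map (fun l => tupGet l key)).sum) (g.length : Int),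
         (PySem.List.min? (g.map (fun l => l.2.1)) (fun y => y)).getD 0,
         (PySem.List.max? (g.map (fun l => l.2.2)) (fun y => y)).getD 0))

-- ===== PORT B =====
def consolidate_lines_py_alt (lines : List (Int × Int × Int)) (key : Int) (tol : Int) : List (Int × Int × Int) :=
  if lines = [] then []
  else
    match PySem.List.sorted lines (fun l => tupGet l key) false with
    | [] => []
    | first :: rest =>
      let st := rest.foldl
        (fun (st : Int × Int × Int × Int × Int × List (Int × Int × Int)) line =>
          let k := tupGet line key
          if |k - st.2.2.2.2.1| < tol then
            (st.1 + k, st.2.1 + 1, min st.2.2.1 line.2.1, max st.2.2.2.1 line.2.2, k, st.2.2.2.2.2)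
          else
            (k, 1, line.2.1, line.2.2, k,
             st.2.2.2.2.2 ++ [(PySem.Int.floordiv st.1 st.2.1, st.2.2.1, st.2.2.2.1)]))
        (tupGet first key, 1, first.2.1, first.2.2, tupGet first key, [])
      st.2.2.2.2.2 ++ [(PySem.Int.floordiv st.1 st.2.1, st.2.2.1, st.2.2.2.1)]

-- ===== PRECONDITION & SPEC =====
-- Pre_ excludes only inputs on which Python A raises: a nonempty list with a tuple
-- index outside -3 ≤ key < 3 makes l[key] raise IndexError.
def Pre_consolidate_lines_py (lines : List (Int × Int × Int)) (key : Int) (tol : Int) : Prop :=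
  lines = [] ∨ (-3 ≤ key ∧ key < 3)
instance (lines : List (Int × Int × Int)) (key : Int) (tol : Int) : Decidable (Pre_consolidate_lines_py lines key tol) := by unfold Pre_consolidate_lines_py; infer_instance
def pvWitness_consolidate_lines_py : (List (Int × Int × Int)) × Int × Int := ([(1, 2, 3), (2, 0, 5)], 0, 2)
def Spec_consolidate_lines_py (lines : List (Int × Int × Int)) (key : Int) (tol : Int) (out : List (Int × Int × Int)) : Prop := out = consolidate_lines_py_alt lines key tol
instance (lines : List (Int × Int × Int)) (key : Int) (tol : Int) (out : List (Int × Int × Int)) : Decidable (Spec_consolidate_lines_py lines key tol out) := by unfold Spec_consolidate_lines_py; infer_instance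

-- ===== CLAIM (what is proved, stated in full; the proofs are below) =====
def Claim_equal_consolidate_lines_py : Prop := ∀ (lines : List (Int × Int × Int)) (key : Int) (tol : Int), Dom_consolidate_lines_py lines key tol → Pre_consolidate_lines_py lines key tol → Spec_consolidate_lines_py lines key tol (consolidate_lines_py lines key tol)

-- ===== LEMMAS AND PROOFS =====

-- the group decomposition both loops compute, made explicit
def grp (key tol : Int) : List (Int × Int × Int) → List (Int × Int × Int) → List (List (Int × Int × Int))
  | cur, [] => [cur]
  | cur, x :: xs =>
    if |tupGet x key - tupGet (cur.getLast?.getD (0, 0, 0)) key| < tol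
    then grp key tol (cur ++ [x]) xs
    else cur :: grp key tol [x] xs

def sumk (key : Int) (g : List (Int × Int × Int)) : Int := (g.map (fun l => tupGet l key)).sum

def mnS : List (Int × Int × Int) → Int
  | [] => 0
  | x :: t => (t.map (fun l => l.2.1)).foldl min x.2.1

def mxE : List (Int × Int × Int) → Int
  | [] => 0
  | x :: t => (t.map (fun l => l.2.2)).foldl max x.2.2

def aggT (key : Int) (g : List (Int × Int × Int)) : Int × Int × Int :=
  (PySem.Int.floordiv (sumk key g) (g.length : Int), mnS g, mxE g)

@[simp] lemma sumk_singleton (key : Int) (x : Int × Int × Int) : sumk key [x] = tupGet x key := by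
  simp [sumk]

@[simp] lemma mnS_singleton (x : Int × Int × Int) : mnS [x] = x.2.1 := by simp [mnS]

@[simp] lemma mxE_singleton (x : Int × Int × Int) : mxE [x] = x.2.2 := by simp [mxE]

lemma sumk_concat (key : Int) (g : List (Int × Int × Int)) (x : Int × Int × Int) :
    sumk key (g ++ [x]) = sumk key g + tupGet x key := by
  simp [sumk]

lemma mnS_concat (g : List (Int × Int × Int)) (x : Int × Int × Int) (h : g ≠ []) :
    mnS (g ++ [x]) = min (mnS g) x.2.1 := by
  cases g with
  | nil => exact absurd rfl h
  | cons y t => simp [mnS, List.foldl_append]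

lemma mxE_concat (g : List (Int × Int × Int)) (x : Int × Int × Int) (h : g ≠ []) :
    mxE (g ++ [x]) = max (mxE g) x.2.2 := by
  cases g with
  | nil => exact absurd rfl h
  | cons y t => simp [mxE, List.foldl_append]

lemma grp_ne_nil (key tol : Int) : ∀ (xs cur : List (Int × Int × Int)), cur ≠ [] →
    ∀ g ∈ grp key tol cur xs, g ≠ [] := by
  intro xs
  induction xs with
  | nil => intro cur h g hg; simp [grp] at hg; simpa [hg]
  | cons x xs ih =>
    intro cur h g hg
    simp only [grp] at hg
    split at hg
    · exact ih _ (by simp) g hg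
    · rcases (List.mem_cons).1 hg with rfl | hg'
      · exact h
      · exact ih [x] (by simp) g hg'

-- A's loop, reorganised: the foldl over 'done ++ [cur]' produces 'done ++ grp cur xs'
lemma afold_eq (key tol : Int) : ∀ (xs : List (Int × Int × Int))
    (done : List (List (Int × Int × Int))) (cur : List (Int × Int × Int)), cur ≠ [] →
    xs.foldl
      (fun (gs : List (List (Int × Int × Int))) line =>
        if |tupGet line key - tupGet ((gs.getLast?.getD []).getLast?.getD (0, 0, 0)) key| < tol
        then gs.dropLast ++ [(gs.getLast?.getD []) ++ [line]]
        else gs ++ [[line]])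
      (done ++ [cur])
    = done ++ grp key tol cur xs := by
  intro xs
  induction xs with
  | nil => intro done cur h; simp [grp]
  | cons x xs ih =>
    intro done cur h
    simp only [List.foldl_cons, List.getLast?_concat, Option.getD_some, List.dropLast_concat, grp]
    split
    · exact ih done (cur ++ [x]) (by simp)
    · rw [show (done ++ [cur]) ++ [[x]] = (done ++ [cur]) ++ [[x]] from rfl,
        ih (done ++ [cur]) [x] (by simp)]
      simp

-- B's loop with accumulators for 'cur' computes the aggregates of grp cur xs
lemma bfold_eq (key tol : Int) : ∀ (xs cur : List (Int × Int × Int))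
    (out : List (Int × Int × Int)), cur ≠ [] →
    (let st := xs.foldl
        (fun (st : Int × Int × Int × Int × Int × List (Int × Int × Int)) line =>
          let k := tupGet line key
          if |k - st.2.2.2.2.1| < tol then
            (st.1 + k, st.2.1 + 1, min st.2.2.1 line.2.1, max st.2.2.2.1 line.2.2, k, st.2.2.2.2.2)
          else
            (k, 1, line.2.1, line.2.2, k,
             st.2.2.2.2.2 ++ [(PySem.Int.floordiv st.1 st.2.1, st.2.2.1, st.2.2.2.1)]))
        (sumk key cur, (cur.length : Int), mnS cur, mxE cur,
         tupGet (cur.getLast?.getD (0, 0, 0)) key, out)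
     st.2.2.2.2.2 ++ [(PySem.Int.floordiv st.1 st.2.1, st.2.2.1, st.2.2.2.1)])
    = out ++ (grp key tol cur xs).map (aggT key) := by
  intro xs
  induction xs with
  | nil =>
    intro cur out h
    simp [grp, aggT]
  | cons x xs ih =>
    intro cur out h
    simp only [List.foldl_cons, grp]
    split
    · have := ih (cur ++ [x]) out (by simp)
      rw [sumk_concat, mnS_concat _ _ h, mxE_concat _ _ h] at this
      simpa [List.getLast?_concat, Int.natCast_add] using this
    · have h1 := ih [x] (out ++ [(PySem.Int.floordiv (sumk key cur) (cur.length : Int), mnS cur, mxE cur)]) (by simp)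
      simp only [sumk_singleton, mnS_singleton, mxE_singleton, List.length_cons,
        List.length_nil, zero_add, Nat.cast_one, List.getLast?_singleton,
        Option.getD_some] at h1
      rw [h1]
      simp [aggT]

lemma agg_eq (key : Int) (g : List (Int × Int × Int)) (h : g ≠ []) :
    (PySem.Int.floordiv ((g.map (fun l => tupGet l key)).sum) (g.length : Int),
     (PySem.List.min? (g.map (fun l => l.2.1)) (fun y => y)).getD 0,
     (PySem.List.max? (g.map (fun l => l.2.2)) (fun y => y)).getD 0) = aggT key g := by
  cases g with
  | nil => exact absurd rfl h
  | cons x t =>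
    simp [aggT, sumk, mnS, mxE, List.map_cons, PySem.List.min?_id_cons, PySem.List.max?_id_cons]

-- ===== VERDICT (by name: the statement is the Claim_ definition above) =====
theorem consolidate_lines_py_spec : Claim_equal_consolidate_lines_py := by
  intro lines key tol _ _
  unfold Spec_consolidate_lines_py consolidate_lines_py consolidate_lines_py_alt
  by_cases hnil : lines = []
  · simp [hnil]
  · simp only [hnil, if_false]
    cases hs : PySem.List.sorted lines (fun l => tupGet l key) false with
    | nil => rfl
    | cons first rest =>
      have hA := afold_eq key tol rest [] [first] (by simp)
      simp only [List.nil_append] at hA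
      have hB := bfold_eq key tol rest [first] [] (by simp)
      simp only [sumk_singleton, mnS_singleton, mxE_singleton, List.length_cons,
        List.length_nil, zero_add, Nat.cast_one, List.getLast?_singleton,
        Option.getD_some, List.nil_append] at hB
      dsimp only
      rw [hA, hB]
      exact List.map_congr_left (fun g hg => agg_eq key g (grp_ne_nil key tol rest [first] (by simp) g hg))
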